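-- pv_equiv track=rewrite | github.com/joransiu/v8z-devtools | auto-patch/auto-patch.py | parsePatch
-- ===== SOURCE A (Python) =====
-- def parsePatch(file):
--   patches = []
--   current = ""
--   for line in file.split('\n'):
--     if line.find("Index:") == 0:
--       patches.append(current)
--       current = ""
--     current += line + '\n'
--   patches.append(current)
--
--   return patches
-- ===== SOURCE B (Python) =====
-- def parsePatch(file):
--   lines = file.split('\n')
--   marks = [i for i, l in enumerate(lines) if l.startswith("Index:")]
--   bounds = [0] + marks + [len(lines)]
--   return [''.join(l + '\n' for l in lines[s:e])
--           for s, e in zip(bounds, bounds[1:])]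
-- ===== Notes on version B (the rewrite author's own statement) =====
-- stated objective: alternative
-- what changed: Replaces A's single accumulating pass (growing a current-chunk string, flushing at each 'Index:' line) with a two-pass index-then-slice decomposition: collect the positions of 'Index:' lines, bracket them with 0 and len(lines) as segment boundaries, and emit each chunk by slicing and joining.
import Mathlib
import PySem

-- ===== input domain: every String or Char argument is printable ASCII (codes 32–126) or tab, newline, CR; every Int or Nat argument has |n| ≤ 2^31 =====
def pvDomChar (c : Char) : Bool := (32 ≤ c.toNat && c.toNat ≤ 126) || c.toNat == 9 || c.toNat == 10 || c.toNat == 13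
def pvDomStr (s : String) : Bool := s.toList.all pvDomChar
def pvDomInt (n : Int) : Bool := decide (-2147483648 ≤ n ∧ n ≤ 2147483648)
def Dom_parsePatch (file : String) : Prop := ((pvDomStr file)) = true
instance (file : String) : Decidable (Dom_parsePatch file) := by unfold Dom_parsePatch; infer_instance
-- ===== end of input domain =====

-- B replaces A's single accumulating pass with a two-pass index-then-slice decomposition (same cost; alternative structure).

-- ===== PORT A =====
-- file.split('\n') is PySem.Str.split?; it is none only for an empty separator, so .getD [] is exact here
def parsePatch (file : String) : List String :=
  let r := ((PySem.Str.split? file "\n").getD []).foldl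
    (fun (st : List String × String) line =>
      if PySem.Str.find line "Index:" == 0 then
        (st.1 ++ [st.2], "" ++ line ++ "\n")
      else
        (st.1, st.2 ++ line ++ "\n"))
    ([], "")
  r.1 ++ [r.2]

-- ===== PORT B =====
-- file.split('\n') is PySem.Str.split?; it is none only for an empty separator, so .getD [] is exact here
def parsePatch_alt (file : String) : List String :=
  let lines := (PySem.Str.split? file "\n").getD []
  let marks := (PySem.List.enumerate lines).filterMap
    (fun p => if PySem.Str.startswith p.2 "Index:" then some p.1 else none)
  let bounds := (0 : Int) :: (marks ++ [(lines.length : Int)])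
  (bounds.zip bounds.tail).map
    (fun p => PySem.Str.join "" ((PySem.List.slice lines (some p.1) (some p.2)).map (· ++ "\n")))

-- ===== PRECONDITION & SPEC =====
def Spec_parsePatch (file : String) (out : List String) : Prop := out = parsePatch_alt file
instance (file : String) (out : List String) : Decidable (Spec_parsePatch file out) := by unfold Spec_parsePatch; infer_instance

-- ===== CLAIM (what is proved, stated in full; the proofs are below) =====
def Claim_equal_parsePatch : Prop := ∀ (file : String), Dom_parsePatch file → Spec_parsePatch file (parsePatch file)

-- ===== LEMMAS AND PROOFS =====

-- the test both programs make on a line, as one boolean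
def pvMark (l : String) : Bool := PySem.Str.startswith l "Index:"

-- recursive characterisation of the chunk list, with the pending chunk as accumulator
def pvChunks : List String → String → List String
  | [], cur => [cur]
  | l :: ls, cur =>
    if pvMark l then cur :: pvChunks ls (l ++ "\n")
    else pvChunks ls (cur ++ l ++ "\n")

def pvMapHead (f : String → String) : List String → List String
  | [] => []
  | x :: xs => f x :: xs

def pvJoinLn (seg : List String) : String := PySem.Str.join "" (seg.map (· ++ "\n"))

def pvSegMap (lines : List String) (b : List Int) : List String :=
  (b.zip b.tail).map (fun p => pvJoinLn (PySem.List.slice lines (some p.1) (some p.2)))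

def pvMarksFrom (ls : List String) (s : Int) : List Int :=
  (PySem.List.enumerate ls s).filterMap (fun p => if pvMark p.2 then some p.1 else none)

def pvSegs (ls : List String) : List String :=
  pvSegMap ls ((0 : Int) :: (pvMarksFrom ls 0 ++ [(ls.length : Int)]))

lemma pv_mark_iff (l : String) :
    (PySem.Str.find l "Index:" == 0) = pvMark l := by
  have hfind := PySem.Str.find_eq l "Index:"
  rw [Bool.eq_iff_iff, beq_iff_eq, hfind, pvMark, PySem.Str.startswith_eq, PySem.Chars.startswith_iff]
  constructor
  · intro h0
    have := (PySem.Chars.find_spec (s := l.toList) (sub := "Index:".toList) (by omega)).1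
    rw [h0] at this
    simpa using this
  · intro hpre
    have hne : PySem.Chars.find l.toList "Index:".toList ≠ -1 :=
      (PySem.Chars.find_ne_neg_one_iff _ _).mpr hpre.isInfix
    have hge : (0:Int) ≤ PySem.Chars.find l.toList "Index:".toList := by
      have := PySem.Chars.neg_one_le_find l.toList "Index:".toList
      omega
    have hspec := PySem.Chars.find_spec hge
    by_contra hne0
    have hpos : 0 < (PySem.Chars.find l.toList "Index:".toList).toNat := by
      omega
    exact hspec.2 0 hpos (by simpa using hpre)
  
lemma pvA_fold (ls : List String) (patches : List String) (cur : String) :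
    (ls.foldl
      (fun (st : List String × String) line =>
        if PySem.Str.find line "Index:" == 0 then
          (st.1 ++ [st.2], "" ++ line ++ "\n")
        else
          (st.1, st.2 ++ line ++ "\n")) (patches, cur)).1
    ++ [(ls.foldl
      (fun (st : List String × String) line =>
        if PySem.Str.find line "Index:" == 0 then
          (st.1 ++ [st.2], "" ++ line ++ "\n")
        else
          (st.1, st.2 ++ line ++ "\n")) (patches, cur)).2]
    = patches ++ pvChunks ls cur := by
  induction ls generalizing patches cur with
  | nil => simp [pvChunks]
  | cons l ls ih =>
    simp only [List.foldl_cons, pvChunks, pv_mark_iff l]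
    by_cases h : pvMark l
    · rw [if_pos h, if_pos h, ih]
      simp [String.empty_append]
    · rw [if_neg h, if_neg h, ih]

lemma pvMarksFrom_cons (l : String) (ls : List String) (s : Int) :
    pvMarksFrom (l :: ls) s =
      (if pvMark l then [s] else []) ++ pvMarksFrom ls (s + 1) := by
  by_cases h : pvMark l <;>
    simp [pvMarksFrom, PySem.List.enumerate_cons, h]

lemma pvMarksFrom_shift (ls : List String) (s : Int) :
    pvMarksFrom ls (s + 1) = (pvMarksFrom ls s).map (· + 1) := by
  induction ls generalizing s with
  | nil => rfl
  | cons l ls ih =>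
    rw [pvMarksFrom_cons, pvMarksFrom_cons, ih (s + 1), List.map_append]
    by_cases h : pvMark l <;> simp [h]

lemma pvMarksFrom_le (ls : List String) (s : Int) :
    ∀ x ∈ pvMarksFrom ls s, s ≤ x := by
  induction ls generalizing s with
  | nil => intro x hx; simp [pvMarksFrom] at hx
  | cons l ls ih =>
    intro x hx
    rw [pvMarksFrom_cons] at hx
    rcases List.mem_append.mp hx with h1 | h2
    · by_cases h : pvMark l <;> simp [h] at h1; omega
    · have := ih (s + 1) x h2; omega

lemma pvMapTail {α β : Type} (f : α → β) (b : List α) :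
    (b.map f).tail = b.tail.map f := by cases b <;> rfl

lemma pvJoinLn_nil : pvJoinLn [] = "" := rfl

lemma pvChars_join_nil_cons (x : List Char) (r : List (List Char)) :
    PySem.Chars.join [] (x :: r) = x ++ PySem.Chars.join [] r := by
  cases r <;> simp [PySem.Chars.join, List.intercalate]

lemma pvJoinLn_cons (x : String) (xs : List String) :
    pvJoinLn (x :: xs) = (x ++ "\n") ++ pvJoinLn xs := by
  apply String.ext
  simp [pvJoinLn, PySem.Str.toList_join, String.toList_append, pvChars_join_nil_cons]

lemma pvSlice_succ (l : String) (ls : List String) (a b : Int)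
    (ha : 0 ≤ a) (hb : 0 ≤ b) :
    PySem.List.slice (l :: ls) (some (a + 1)) (some (b + 1)) =
      PySem.List.slice ls (some a) (some b) := by
  rw [PySem.List.slice_toNat _ (by omega) (by omega), PySem.List.slice_toNat _ ha hb,
    show (a + 1).toNat = a.toNat + 1 from by omega, List.drop_succ_cons]
  congr 1
  omega

lemma pvSlice_zero_succ (l : String) (ls : List String) (b : Int) (hb : 0 ≤ b) :
    PySem.List.slice (l :: ls) (some 0) (some (b + 1)) =
      l :: PySem.List.slice ls (some 0) (some b) := by
  rw [PySem.List.slice_toNat _ (by omega) (by omega),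
    PySem.List.slice_toNat _ (by omega : (0:Int) ≤ 0) hb]
  simp only [Int.toNat_zero, Nat.sub_zero, List.drop_zero]
  rw [show (b + 1).toNat = b.toNat + 1 from by omega]
  simp [List.take_succ_cons]

lemma pvSegMap_shift (l : String) (ls : List String) (b : List Int)
    (hnn : ∀ x ∈ b, 0 ≤ x) :
    pvSegMap (l :: ls) (b.map (· + 1)) = pvSegMap ls b := by
  unfold pvSegMap
  rw [pvMapTail, List.zip_map, List.map_map]
  apply List.map_congr_left
  intro p hp
  obtain ⟨h1, h2⟩ := List.of_mem_zip (a := p.1) (b := p.2) (by simpa using hp)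
  have h2' : p.2 ∈ b := List.mem_of_mem_tail h2
  simp [Prod.map, pvSlice_succ l ls p.1 p.2 (hnn _ h1) (hnn _ h2')]

lemma pvSegMap_cons_shift (l : String) (ls : List String) (t : List Int)
    (ht : t ≠ []) (hnn : ∀ x ∈ t, 0 ≤ x) :
    pvSegMap (l :: ls) ((0 : Int) :: t.map (· + 1)) =
      pvMapHead ((l ++ "\n") ++ ·) (pvSegMap ls ((0 : Int) :: t)) := by
  rcases t with _ | ⟨h, r⟩
  · exact absurd rfl ht
  have hh : (0:Int) ≤ h := hnn h (by simp)
  have hshift := pvSegMap_shift l ls (h :: r) hnn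
  unfold pvSegMap at hshift ⊢
  simp only [List.map_cons, List.tail_cons, List.zip_cons_cons, List.map_cons] at hshift ⊢
  rw [pvSlice_zero_succ l ls h hh, pvJoinLn_cons]
  simp only [pvMapHead]
  exact congrArg _ hshift

lemma pvSegs_nil : pvSegs [] = [""] := rfl

lemma pvSegs_cons (l : String) (ls : List String) :
    pvSegs (l :: ls) =
      if pvMark l then "" :: pvMapHead ((l ++ "\n") ++ ·) (pvSegs ls)
      else pvMapHead ((l ++ "\n") ++ ·) (pvSegs ls) := by
  have hlen : ((l :: ls).length : Int) = (ls.length : Int) + 1 := by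
    simp
  have hbounds : pvMarksFrom (l :: ls) 0 ++ [((l :: ls).length : Int)] =
      (if pvMark l then [(0:Int)] else []) ++
        (pvMarksFrom ls 0 ++ [(ls.length : Int)]).map (· + 1) := by
    rw [pvMarksFrom_cons, pvMarksFrom_shift ls 0, List.map_append, hlen]
    simp [List.append_assoc]
  have ht : pvMarksFrom ls 0 ++ [(ls.length : Int)] ≠ [] := by simp
  have hnn : ∀ x ∈ pvMarksFrom ls 0 ++ [(ls.length : Int)], (0:Int) ≤ x := by
    intro x hx
    rcases List.mem_append.mp hx with h1 | h2
    · exact pvMarksFrom_le ls 0 x h1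
    · simp at h2; omega
  by_cases h : pvMark l
  · rw [pvSegs, hbounds]
    simp only [h, if_true, List.singleton_append]
    show pvSegMap (l :: ls) ((0:Int) :: (0:Int) ::
      (pvMarksFrom ls 0 ++ [(ls.length : Int)]).map (· + 1)) = _
    have hrest := pvSegMap_cons_shift l ls _ ht hnn
    unfold pvSegMap at hrest ⊢
    simp only [List.tail_cons, List.zip_cons_cons, List.map_cons]
    rw [show PySem.List.slice (l :: ls) (some 0) (some 0) = [] by
      rw [PySem.List.slice_toNat _ (by omega : (0:Int) ≤ 0) (by omega : (0:Int) ≤ 0)]; simp]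
    rw [pvJoinLn_nil]
    exact congrArg _ hrest
  · rw [pvSegs, hbounds]
    simp only [h, Bool.false_eq_true]
    exact pvSegMap_cons_shift l ls _ ht hnn

lemma pvChunks_eq_mapHead (ls : List String) (cur : String) :
    pvChunks ls cur = pvMapHead (cur ++ ·) (pvSegs ls) := by
  induction ls generalizing cur with
  | nil => simp [pvChunks, pvSegs_nil, pvMapHead]
  | cons l ls ih =>
    rw [pvSegs_cons]
    by_cases h : pvMark l
    · simp only [pvChunks, h, if_true, ih (l ++ "\n"), pvMapHead, String.append_empty]
    · simp only [pvChunks, h, ih (cur ++ l ++ "\n")]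
      cases pvSegs ls with
      | nil => rfl
      | cons x xs => simp [pvMapHead, String.append_assoc]

lemma pvAlt_eq_segs (file : String) :
    parsePatch_alt file = pvSegs ((PySem.Str.split? file "\n").getD []) := rfl

-- ===== VERDICT (by name: the statement is the Claim_ definition above) =====
theorem parsePatch_spec : Claim_equal_parsePatch := by
  intro file _
  unfold Spec_parsePatch parsePatch
  rw [pvAlt_eq_segs, pvA_fold, List.nil_append, pvChunks_eq_mapHead]
  cases pvSegs ((PySem.Str.split? file "\n").getD []) with
  | nil => rfl
  | cons x xs => simp [pvMapHead]
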